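-- pv_equiv track=rewrite | github.com/metalllinux/metalllinux.github.io | scripts/process_linux_journey.py | split_prose_and_code
-- ===== SOURCE A (Python) =====
-- def split_prose_and_code(content: str):
--     """Split content into segments of (text, is_code) tuples."""
--     segments = []
--     lines = content.split("\n")
--     in_code_block = False
--     current_segment = []
--     current_is_code = False
--
--     for line in lines:
--         stripped = line.strip()
--         if stripped.startswith("```"):
--             if in_code_block:
--                 # End of code block
--                 current_segment.append(line)
--                 segments.append(("\n".join(current_segment), True))
--                 current_segment = []
--                 in_code_block = False
--                 current_is_code = False
--             else:
--                 # Start of code block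
--                 if current_segment:
--                     segments.append(("\n".join(current_segment), False))
--                 current_segment = [line]
--                 in_code_block = True
--                 current_is_code = True
--         else:
--             if not current_segment and not in_code_block:
--                 current_is_code = False
--             current_segment.append(line)
--
--     if current_segment:
--         segments.append(("\n".join(current_segment), in_code_block))
--
--     return segments
-- ===== SOURCE B (Python) =====
-- def split_prose_and_code(content: str):
--     """Split content into segments of (text, is_code) tuples."""
--     segments = []
--     lines = content.split("\n")
--     while lines:
--         pre, rest = _span_nonfence(lines)
--         if not rest:
--             # no fence at all: everything left is prose
--             segments.append(("\n".join(pre), False))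
--             break
--         if pre:
--             segments.append(("\n".join(pre), False))
--         fence, tail = rest[0], rest[1:]
--         body, rest2 = _span_nonfence(tail)
--         if not rest2:
--             # unclosed fence: rest of the document is code
--             segments.append(("\n".join([fence] + body), True))
--             break
--         segments.append(("\n".join([fence] + body + [rest2[0]]), True))
--         lines = rest2[1:]
--     return segments
--
--
-- def _is_fence(line):
--     return line.strip().startswith("```")
--
--
-- def _span_nonfence(lines):
--     """Split lines at the first fence line: (before, from-fence-on)."""
--     for k, l in enumerate(lines):
--         if _is_fence(l):
--             return lines[:k], lines[k:]
--     return lines, []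
-- ===== Notes on version B (the rewrite author's own statement) =====
-- stated objective: alternative
-- what changed: Replaced A's toggling in_code_block state machine (line-by-line fold carrying current_segment/in_code_block/current_is_code) by a span-based pass that repeatedly cuts the line list at the next fence line, emitting the prose slice and the fenced code slice directly.
import Mathlib
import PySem

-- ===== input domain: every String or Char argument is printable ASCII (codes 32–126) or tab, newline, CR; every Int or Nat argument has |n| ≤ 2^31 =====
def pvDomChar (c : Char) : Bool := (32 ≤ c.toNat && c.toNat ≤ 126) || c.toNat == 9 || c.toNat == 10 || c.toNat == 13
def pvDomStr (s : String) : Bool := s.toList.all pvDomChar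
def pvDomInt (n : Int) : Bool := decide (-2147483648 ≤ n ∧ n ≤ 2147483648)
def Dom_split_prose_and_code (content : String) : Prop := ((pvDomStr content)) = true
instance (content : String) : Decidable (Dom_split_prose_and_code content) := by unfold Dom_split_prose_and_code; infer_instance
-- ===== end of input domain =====

-- B replaces A's toggling line-by-line state machine by a span-based pass that cuts the
-- line list directly at fence lines (objective: simpler/alternative decomposition, same cost).

-- shared helper: line.strip().startswith("```")
def pvIsFence (line : String) : Bool := PySem.Str.startswith (PySem.Str.strip line) "```"

-- ===== PORT A =====
-- loop state: (segments, current_segment, in_code_block, current_is_code)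
def pvStepA (st : List (String × Bool) × List String × Bool × Bool) (line : String) :
    List (String × Bool) × List String × Bool × Bool :=
  let (segs, cur, inc, curIs) := st
  if pvIsFence line then
    if inc then
      -- end of code block
      (segs ++ [(PySem.Str.join "\n" (cur ++ [line]), true)], [], false, false)
    else
      -- start of code block
      ((if cur = [] then segs else segs ++ [(PySem.Str.join "\n" cur, false)]), [line], true, true)
  else
    (segs, cur ++ [line], inc, if cur = [] ∧ inc = false then false else curIs)

def split_prose_and_code (content : String) : List (String × Bool) :=
  let lines := (PySem.Str.split? content "\n").getD []
  match lines.foldl pvStepA ([], [], false, false) with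
  | (segs, cur, inc, _) => if cur = [] then segs else segs ++ [(PySem.Str.join "\n" cur, inc)]

-- ===== PORT B =====
-- Source B's _span_nonfence(lines): split at the first fence line
def pvSpanPre (lines : List String) : List String := lines.takeWhile (fun x => !pvIsFence x)
def pvSpanRest (lines : List String) : List String := lines.dropWhile (fun x => !pvIsFence x)

-- Source B's while-loop over the remaining lines
def pvGoB (lines : List String) : List (String × Bool) :=
  if lines = [] then []
  else
    let pre := pvSpanPre lines
    match hr : pvSpanRest lines with
    | [] => [(PySem.Str.join "\n" pre, false)]          -- no fence: all prose
    | f :: tail =>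
      let proseSeg : List (String × Bool) := if pre = [] then [] else [(PySem.Str.join "\n" pre, false)]
      let body := pvSpanPre tail
      match hb : pvSpanRest tail with
      | [] => proseSeg ++ [(PySem.Str.join "\n" (f :: body), true)]   -- unclosed fence
      | g :: rest2 => proseSeg ++ [(PySem.Str.join "\n" ((f :: body) ++ [g]), true)] ++ pvGoB rest2
termination_by lines.length
decreasing_by
  have h1 : (f :: tail).length ≤ lines.length := by
    rw [← hr]; exact lines.length_dropWhile_le _
  have h2 : (g :: rest2).length ≤ tail.length := by
    rw [← hb]; exact tail.length_dropWhile_le _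
  simp only [List.length_cons] at h1 h2; omega

def split_prose_and_code_alt (content : String) : List (String × Bool) :=
  pvGoB ((PySem.Str.split? content "\n").getD [])

-- ===== PRECONDITION & SPEC =====
def Spec_split_prose_and_code (content : String) (out : List (String × Bool)) : Prop := out = split_prose_and_code_alt content
instance (content : String) (out : List (String × Bool)) : Decidable (Spec_split_prose_and_code content out) := by unfold Spec_split_prose_and_code; infer_instance

-- ===== CLAIM (what is proved, stated in full; the proofs are below) =====
def Claim_equal_split_prose_and_code : Prop := ∀ (content : String), Dom_split_prose_and_code content → Spec_split_prose_and_code content (split_prose_and_code content)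

-- ===== LEMMAS AND PROOFS =====

-- A's finalization ("if current_segment: segments.append(...)")
def pvFinA (st : List (String × Bool) × List String × Bool × Bool) : List (String × Bool) :=
  match st with
  | (segs, cur, inc, _) => if cur = [] then segs else segs ++ [(PySem.Str.join "\n" cur, inc)]

lemma pvHeadRest {lines xs : List String} {x : String}
    (h : pvSpanRest lines = x :: xs) : pvIsFence x = true := by
  have hne : lines.dropWhile (fun x => !pvIsFence x) ≠ [] := by
    simp [pvSpanRest] at h; simp [h]
  have := List.head_dropWhile_not (p := fun x => !pvIsFence x) (l := lines) hne
  simp only [pvSpanRest] at h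
  simp only [h, List.head_cons, Bool.not_eq_false'] at this
  simpa using this

lemma pvSplitSpan (lines : List String) : pvSpanPre lines ++ pvSpanRest lines = lines :=
  List.takeWhile_append_dropWhile

-- a non-fence line is appended to current_segment in either mode
lemma pvStepNonFence {segs : List (String × Bool)} {cur : List String} {inc curIs : Bool}
    {a : String} (ha : pvIsFence a = false) :
    pvStepA (segs, cur, inc, curIs) a
      = (segs, cur ++ [a], inc, if cur = [] ∧ inc = false then false else curIs) := by
  simp [pvStepA, ha]

-- a fence line in prose mode flushes the prose and opens a code block
lemma pvStepFenceProse {segs : List (String × Bool)} {cur : List String} {curIs : Bool}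
    {f : String} (hf : pvIsFence f = true) :
    pvStepA (segs, cur, false, curIs) f
      = ((if cur = [] then segs else segs ++ [(PySem.Str.join "\n" cur, false)]), [f], true, true) := by
  simp [pvStepA, hf]

-- a fence line in code mode closes the code block
lemma pvStepFenceCode {segs : List (String × Bool)} {cur : List String} {curIs : Bool}
    {g : String} (hg : pvIsFence g = true) :
    pvStepA (segs, cur, true, curIs) g
      = (segs ++ [(PySem.Str.join "\n" (cur ++ [g]), true)], [], false, false) := by
  simp [pvStepA, hg]

-- folding A's step over fence-free lines (in either mode) just appends them to current_segment
lemma pvFoldBlock (inc : Bool) (blk : List String) (hp : ∀ x ∈ blk, pvIsFence x = false) :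
    ∀ (segs : List (String × Bool)) (cur : List String) (curIs : Bool),
    ∃ c, blk.foldl pvStepA (segs, cur, inc, curIs) = (segs, cur ++ blk, inc, c) := by
  induction blk with
  | nil => intro segs cur curIs; exact ⟨curIs, by simp⟩
  | cons a t ih =>
    intro segs cur curIs
    obtain ⟨c, hc⟩ := ih (fun x hx => hp x (by simp [hx])) segs (cur ++ [a])
      (if cur = [] ∧ inc = false then false else curIs)
    refine ⟨c, ?_⟩
    rw [List.foldl_cons, pvStepNonFence (hp a (by simp)), hc]
    simp

lemma pvMemPre {lines : List String} : ∀ x ∈ pvSpanPre lines, pvIsFence x = false := by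
  intro x hx
  have := List.mem_takeWhile_imp hx
  simpa using this

-- main invariant: from a clean prose state, A's loop+finalization computes segs ++ pvGoB lines
set_option maxHeartbeats 1000000 in
lemma pvMain (lines : List String) :
    ∀ (segs : List (String × Bool)) (curIs : Bool),
    pvFinA (lines.foldl pvStepA (segs, [], false, curIs)) = segs ++ pvGoB lines := by
  intro segs curIs
  by_cases hnil : lines = []
  · subst hnil; simp [pvFinA, pvGoB]
  rw [pvGoB.eq_def]
  simp only [hnil, if_false]
  have hsplit := pvSplitSpan lines
  obtain ⟨c1, hc1⟩ := pvFoldBlock false (pvSpanPre lines) pvMemPre segs [] curIs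
  rcases hr : pvSpanRest lines with _ | ⟨f, tail⟩
  · -- no fence: whole thing is prose
    have hpre : pvSpanPre lines = lines := by rw [hr] at hsplit; simpa using hsplit
    conv_lhs => rw [← hpre]
    rw [hc1]
    have hpne : pvSpanPre lines ≠ [] := by rw [hpre]; exact hnil
    simp [pvFinA, hpne]
  · -- a fence exists
    have hf : pvIsFence f = true := pvHeadRest hr
    conv_lhs => rw [← hsplit, hr, List.foldl_append]
    rw [hc1]
    simp only [List.foldl_cons, List.nil_append]
    rw [pvStepFenceProse hf]
    set po : List (String × Bool) :=
      if pvSpanPre lines = [] then ([] : List (String × Bool))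
      else [(PySem.Str.join "\n" (pvSpanPre lines), false)] with hpo
    have hsegpo : (if pvSpanPre lines = [] then segs
        else segs ++ [(PySem.Str.join "\n" (pvSpanPre lines), false)]) = segs ++ po := by
      by_cases h : pvSpanPre lines = [] <;> simp [hpo, h]
    rw [hsegpo]
    have hsplit2 := pvSplitSpan tail
    obtain ⟨c2, hc2⟩ := pvFoldBlock true (pvSpanPre tail) pvMemPre (segs ++ po) [f] true
    rcases hb : pvSpanRest tail with _ | ⟨g, rest2⟩
    · -- unclosed fence
      have hbody : pvSpanPre tail = tail := by rw [hb] at hsplit2; simpa using hsplit2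
      conv_lhs => rw [show tail = pvSpanPre tail by rw [hbody]]
      rw [hc2]
      simp [pvFinA]
    · -- closed fence at g, continue after it
      have hg : pvIsFence g = true := pvHeadRest hb
      conv_lhs => rw [← hsplit2, hb, List.foldl_append]
      rw [hc2]
      simp only [List.foldl_cons]
      rw [pvStepFenceCode hg]
      rw [pvMain rest2]
      simp
termination_by lines.length
decreasing_by
  have h1 : (f :: tail).length ≤ lines.length := by
    rw [← hr]; exact lines.length_dropWhile_le _
  have h2 : (g :: rest2).length ≤ tail.length := by
    rw [← hb]; exact tail.length_dropWhile_le _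
  simp only [List.length_cons] at h1 h2; omega

-- ===== VERDICT (by name: the statement is the Claim_ definition above) =====
theorem split_prose_and_code_spec : Claim_equal_split_prose_and_code := by
  intro content _
  show split_prose_and_code content = split_prose_and_code_alt content
  unfold split_prose_and_code split_prose_and_code_alt
  have := pvMain ((PySem.Str.split? content "\n").getD []) [] false
  simpa [pvFinA] using this
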